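-- pv_equiv track=rewrite | github.com/vnpavlukov/Study | Coursera/2_Coursers/Basic_progr_in_Py/Week_2/Test_48_count_max_monotonic_repeat.py | find_max_monotonic_repeat
-- ===== SOURCE A (Python) =====
-- def find_max_monotonic_repeat(array):
--     max_monotonic_repeat = 1
--     monotonic_repeat = 1
--
--     if len(array) == 1:
--         return max_monotonic_repeat
--
--     n = 1
--     up = True
--     while n < len(array):
--         if array[n] < array[n - 1]:
--             if not up:
--                 monotonic_repeat = 1
--             monotonic_repeat += 1
--             if monotonic_repeat > max_monotonic_repeat:
--                 max_monotonic_repeat = monotonic_repeat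
--             up = True
--             n += 1
--         elif array[n] > array[n - 1]:
--             if up:
--                 monotonic_repeat = 1
--             monotonic_repeat += 1
--             if monotonic_repeat > max_monotonic_repeat:
--                 max_monotonic_repeat = monotonic_repeat
--             up = False
--             n += 1
--         else:
--             if up:
--                 up = False
--             else:
--                 up = True
--             monotonic_repeat = 1
--             n += 1
--
--     return max_monotonic_repeat
-- ===== SOURCE B (Python) =====
-- def find_max_monotonic_repeat(array):
--     n = len(array)
--     best = 1
--     i = 0
--     while i + 1 < n:
--         s = (array[i + 1] > array[i]) - (array[i + 1] < array[i])
--         if s == 0: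
--             i += 1
--             continue
--         j = i + 1
--         while j + 1 < n and ((array[j + 1] > array[j]) - (array[j + 1] < array[j])) == s:
--             j += 1
--         if j - i + 1 > best:
--             best = j - i + 1
--         i = j
--     return best
-- ===== Notes on version B (the rewrite author's own statement) =====
-- stated objective: alternative
-- what changed: Replaces A's per-element state machine (up flag, lazily reset run counter) by a two-pointer run-jumping scan: an inner loop advances j to the end of the current strictly monotonic run, the outer loop records j-i+1 and jumps i straight to j.
import Mathlib
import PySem

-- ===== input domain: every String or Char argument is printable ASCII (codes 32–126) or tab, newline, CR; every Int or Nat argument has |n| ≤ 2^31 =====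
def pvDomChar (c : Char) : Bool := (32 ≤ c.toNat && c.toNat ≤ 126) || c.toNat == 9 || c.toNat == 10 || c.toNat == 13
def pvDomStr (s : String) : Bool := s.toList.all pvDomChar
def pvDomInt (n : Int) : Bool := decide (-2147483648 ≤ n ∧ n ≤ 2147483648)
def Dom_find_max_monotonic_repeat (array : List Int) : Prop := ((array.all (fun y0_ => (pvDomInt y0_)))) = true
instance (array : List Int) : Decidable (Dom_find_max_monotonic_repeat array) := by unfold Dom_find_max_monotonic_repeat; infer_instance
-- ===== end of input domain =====

-- B replaces A's per-element up-flag state machine by a two-pointer run-jumping scan (an inner loop skips each monotonic run at once); objective: alternative.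


-- ===== PORT A =====
-- A's while loop walks index n with state (max_monotonic_repeat, monotonic_repeat, up),
-- reading only array[n] and array[n-1]; ported as the same state machine carrying the
-- previous element, branches in A's order.
def pvA_loop (prev : Int) (rest : List Int) (maxMr mr : Int) (up : Bool) : Int :=
  match rest with
  | [] => maxMr
  | x :: rs =>
    if x < prev then
      let mr1 := if !up then 1 else mr
      let mr2 := mr1 + 1
      let maxMr' := if mr2 > maxMr then mr2 else maxMr
      pvA_loop x rs maxMr' mr2 true
    else if x > prev then
      let mr1 := if up then 1 else mr
      let mr2 := mr1 + 1
      let maxMr' := if mr2 > maxMr then mr2 else maxMr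
      pvA_loop x rs maxMr' mr2 false
    else
      pvA_loop x rs maxMr 1 (if up then false else true)

def find_max_monotonic_repeat (array : List Int) : Int :=
  if array.length == 1 then 1
  else
    match array with
    | [] => 1
    | a :: rest => pvA_loop a rest 1 1 true

-- ===== PORT B =====
-- s = (array[k+1] > array[k]) - (array[k+1] < array[k])
def pvSgn (a b : Int) : Int := (if b > a then 1 else 0) - (if b < a then 1 else 0)

-- array[k]; Source B only indexes in range, so getD is exact there
def pvAt (array : List Int) (k : Nat) : Int := array.getD k 0

-- inner while loop: advance j while the next adjacent pair has sign s
def pvB_inner (array : List Int) (j : Nat) (s : Int) : Nat :=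
  if j + 1 < array.length ∧ pvSgn (pvAt array j) (pvAt array (j + 1)) = s then
    pvB_inner array (j + 1) s
  else j
termination_by array.length - j

lemma pvB_inner_ge (array : List Int) (j : Nat) (s : Int) : j ≤ pvB_inner array j s := by
  fun_induction pvB_inner with
  | case1 j h ih => omega
  | case2 => omega

-- outer while loop over i with accumulator best
def pvB_outer (array : List Int) (i : Nat) (best : Int) : Int :=
  if h : i + 1 < array.length then
    let s := pvSgn (pvAt array i) (pvAt array (i + 1))
    if s = 0 then pvB_outer array (i + 1) best
    else
      let j := pvB_inner array (i + 1) s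
      let best' := if (j : Int) - i + 1 > best then (j : Int) - i + 1 else best
      pvB_outer array j best'
  else best
termination_by array.length - i
decreasing_by
  · omega
  · have := pvB_inner_ge array (i + 1) (pvSgn (pvAt array i) (pvAt array (i + 1)))
    omega

def find_max_monotonic_repeat_alt (array : List Int) : Int :=
  pvB_outer array 0 1

-- ===== PRECONDITION & SPEC =====
def Spec_find_max_monotonic_repeat (array : List Int) (out : Int) : Prop := out = find_max_monotonic_repeat_alt array
instance (array : List Int) (out : Int) : Decidable (Spec_find_max_monotonic_repeat array out) := by unfold Spec_find_max_monotonic_repeat; infer_instance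

-- ===== CLAIM (what is proved, stated in full; the proofs are below) =====
def Claim_equal_find_max_monotonic_repeat : Prop := ∀ (array : List Int), Dom_find_max_monotonic_repeat array → Spec_find_max_monotonic_repeat array (find_max_monotonic_repeat array)

-- ===== LEMMAS AND PROOFS =====

-- Proof-only reference machinery: the adjacent-difference sign list and a
-- run-length scan over it; both ports are proved equal to 1 + that scan.
def pvB_signs (array : List Int) : List Int :=
  (array.zip array.tail).map (fun p => pvSgn p.1 p.2)

def pvB_scan (signs : List Int) (best run prev : Int) : Int :=
  match signs with
  | [] => best
  | s :: rest =>
    let run' := if s ≠ 0 ∧ s = prev then run + 1 else if s ≠ 0 then 1 else 0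
    let best' := if run' > best then run' else best
    pvB_scan rest best' run' s

lemma pvB_signs_cons (a b : Int) (l : List Int) :
    pvB_signs (a :: b :: l) = pvSgn a b :: pvB_signs (b :: l) := by
  simp [pvB_signs]

-- Loop invariant tying A's state (maxMr, mr, up) to the scan state (best, run, prev):
-- maxMr = best + 1, mr = run + 1; prev ≠ 0 fixes up to the run's direction; prev = 0 forces run = 0.
lemma pv_key (rest : List Int) : ∀ (prev best run p : Int) (up : Bool),
    0 ≤ best →
    (p = -1 ∨ p = 0 ∨ p = 1) →
    (p = -1 → up = true) →
    (p = 1 → up = false) →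
    (p = 0 → run = 0) →
    pvA_loop prev rest (best + 1) (run + 1) up = pvB_scan (pvB_signs (prev :: rest)) best run p + 1 := by
  induction rest with
  | nil => intro prev best run p up _ _ _ _ _; simp [pvA_loop, pvB_signs, pvB_scan]
  | cons x rs ih =>
    intro prev best run p up hb hp hneg hpos hz
    rw [pvB_signs_cons]
    by_cases hlt : x < prev
    · have hngt : ¬ x > prev := by omega
      have hs : pvSgn prev x = -1 := by simp [pvSgn, hlt, hngt]
      rw [hs]
      rcases hp with h | h | h
      · subst h
        have hup := hneg rfl; subst hup
        simp only [pvA_loop, pvB_scan, hlt, if_pos, Bool.not_true, Bool.false_eq_true,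
          if_false]
        norm_num only
        have hmax : (if run + 1 + 1 > best + 1 then run + 1 + 1 else best + 1)
            = (if run + 1 > best then run + 1 else best) + 1 := by split_ifs <;> omega
        rw [hmax]
        exact ih x _ (run + 1) (-1) true (by split_ifs <;> omega) (by omega)
          (fun _ => rfl) (by omega) (by omega)
      · subst h
        have hr0 := hz rfl; subst hr0
        simp only [pvA_loop, pvB_scan, hlt, if_pos]
        have h1 : ¬ ((-1:Int) ≠ 0 ∧ (-1:Int) = 0) := by norm_num
        rw [if_neg h1, if_pos (by norm_num : (-1:Int) ≠ 0)]
        have hmr1 : (if !up then (1:Int) else 0 + 1) = 1 := by cases up <;> simp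
        rw [hmr1]
        have hmax : (if (1:Int) + 1 > best + 1 then (1:Int) + 1 else best + 1)
            = (if (1:Int) > best then 1 else best) + 1 := by split_ifs <;> omega
        rw [hmax]
        exact ih x _ 1 (-1) true (by split_ifs <;> omega) (by omega)
          (fun _ => rfl) (by omega) (by omega)
      · subst h
        have hup := hpos rfl; subst hup
        simp only [pvA_loop, pvB_scan, hlt, if_pos, Bool.not_false, if_true]
        have h1 : ¬ ((-1:Int) ≠ 0 ∧ (-1:Int) = 1) := by norm_num
        rw [if_neg h1, if_pos (by norm_num : (-1:Int) ≠ 0)]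
        have hmax : (if (1:Int) + 1 > best + 1 then (1:Int) + 1 else best + 1)
            = (if (1:Int) > best then 1 else best) + 1 := by split_ifs <;> omega
        rw [hmax]
        exact ih x _ 1 (-1) true (by split_ifs <;> omega) (by omega)
          (fun _ => rfl) (by omega) (by omega)
    · by_cases hgt : x > prev
      · have hs : pvSgn prev x = 1 := by simp [pvSgn, hlt, hgt]
        rw [hs]
        rcases hp with h | h | h
        · subst h
          have hup := hneg rfl; subst hup
          simp only [pvA_loop, pvB_scan, hlt, hgt, if_neg, if_pos, if_true]
          have h1 : ¬ ((1:Int) ≠ 0 ∧ (1:Int) = -1) := by norm_num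
          rw [if_neg h1, if_pos (by norm_num : (1:Int) ≠ 0)]
          have hmax : (if (1:Int) + 1 > best + 1 then (1:Int) + 1 else best + 1)
              = (if (1:Int) > best then 1 else best) + 1 := by split_ifs <;> omega
          rw [hmax]
          exact ih x _ 1 1 false (by split_ifs <;> omega) (by omega)
            (by omega) (fun _ => rfl) (by omega)
        · subst h
          have hr0 := hz rfl; subst hr0
          simp only [pvA_loop, pvB_scan, hlt, hgt, if_neg, if_pos]
          have h1 : ¬ ((1:Int) ≠ 0 ∧ (1:Int) = 0) := by norm_num
          rw [if_neg h1, if_pos (by norm_num : (1:Int) ≠ 0)]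
          have hmr1 : (if up then (1:Int) else 0 + 1) = 1 := by cases up <;> simp
          rw [hmr1]
          have hmax : (if (1:Int) + 1 > best + 1 then (1:Int) + 1 else best + 1)
              = (if (1:Int) > best then 1 else best) + 1 := by split_ifs <;> omega
          rw [hmax]
          exact ih x _ 1 1 false (by split_ifs <;> omega) (by omega)
            (by omega) (fun _ => rfl) (by omega)
        · subst h
          have hup := hpos rfl; subst hup
          simp only [pvA_loop, pvB_scan, hlt, hgt, if_neg, if_pos, if_false]
          norm_num only
          simp only [Bool.false_eq_true, if_false, and_self, if_true]
          have hmax : (if run + 1 + 1 > best + 1 then run + 1 + 1 else best + 1)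
              = (if run + 1 > best then run + 1 else best) + 1 := by split_ifs <;> omega
          rw [hmax]
          exact ih x _ (run + 1) 1 false (by split_ifs <;> omega) (by omega)
            (by omega) (fun _ => rfl) (by omega)
      · have hs : pvSgn prev x = 0 := by simp [pvSgn, hlt, hgt]
        rw [hs]
        simp only [pvA_loop, pvB_scan, hlt, hgt, if_neg]
        have h1 : ¬ ((0:Int) ≠ 0 ∧ (0:Int) = p) := by norm_num
        rw [if_neg h1, if_neg (by norm_num : ¬ (0:Int) ≠ 0)]
        have hbest : (if (0:Int) > best then (0:Int) else best) = best := by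
          rw [if_neg (by omega)]
        rw [hbest]
        have := ih x best 0 0 (if up then false else true) hb (by omega)
          (by omega) (by omega) (fun _ => rfl)
        simpa using this

-- List-level counterparts of B's two loops, over the sign list.
def pvJumpLen (s : Int) : List Int → Nat
  | [] => 0
  | x :: r => if x = s then pvJumpLen s r + 1 else 0

def pvJump : List Int → Int → Int
  | [], best => best
  | s :: r, best =>
    if s = 0 then pvJump r best
    else
      let k := pvJumpLen s r
      pvJump (r.drop k) (if (k : Int) + 2 > best then (k : Int) + 2 else best)
termination_by l _ => l.length
decreasing_by
  all_goals have h1 := List.length_drop (l := r) (i := pvJumpLen s r)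
  all_goals simp only [List.length_cons]
  all_goals omega

lemma pvJumpLen_take (s : Int) (r : List Int) :
    r.take (pvJumpLen s r) = List.replicate (pvJumpLen s r) s := by
  induction r with
  | nil => simp [pvJumpLen]
  | cons x r ih =>
    by_cases h : x = s
    · subst h; simp [pvJumpLen, List.replicate_succ, ih]
    · simp [pvJumpLen, h]

lemma pvJumpLen_head (s : Int) (r : List Int) :
    ∀ x ∈ (r.drop (pvJumpLen s r)).head?, x ≠ s := by
  induction r with
  | nil => simp
  | cons x r ih =>
    by_cases h : x = s
    · subst h; simpa [pvJumpLen] using ih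
    · simpa [pvJumpLen, h] using h


lemma pvJump_nil (best : Int) : pvJump [] best = best := by
  rw [pvJump.eq_def]

lemma pvJump_cons (s : Int) (r : List Int) (best : Int) :
    pvJump (s :: r) best =
      if s = 0 then pvJump r best
      else pvJump (r.drop (pvJumpLen s r))
        (if (pvJumpLen s r : Int) + 2 > best then (pvJumpLen s r : Int) + 2 else best) := by
  rw [pvJump.eq_def]

-- Scanning a block of k equal nonzero signs from matching prev state.
lemma pv_scan_replicate (s : Int) (hs : s ≠ 0) (rest : List Int) :
    ∀ (k : Nat) (best run : Int), run ≤ best →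
      pvB_scan (List.replicate k s ++ rest) best run s
        = pvB_scan rest (max best (run + k)) (run + k) s := by
  intro k
  induction k with
  | zero =>
    intro best run h
    simp only [List.replicate_zero, List.nil_append, Nat.cast_zero, add_zero]
    congr 1
    omega
  | succ k ih =>
    intro best run h
    rw [List.replicate_succ, List.cons_append]
    simp only [pvB_scan]
    rw [if_pos (show s ≠ 0 ∧ True from ⟨hs, trivial⟩)]
    rw [ih (if run + 1 > best then run + 1 else best) (run + 1) (by split_ifs <;> omega)]
    congr 1
    · push_cast; split_ifs <;> omega
    · push_cast; ring

-- The jump over a sign list equals the run-length scan over it, shifted by one.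
lemma pv_jump_eq_scan : ∀ (n : Nat) (l : List Int), l.length ≤ n →
    ∀ (best run prev : Int),
    0 ≤ best → run ≤ best → (prev = 0 ∨ l.headD 0 ≠ prev) →
    pvJump l (best + 1) = pvB_scan l best run prev + 1 := by
  intro n
  induction n with
  | zero =>
    intro l hl best run prev _ _ _
    have : l = [] := List.eq_nil_of_length_eq_zero (by omega)
    subst this
    simp [pvJump_nil, pvB_scan]
  | succ n ih =>
    intro l hl best run prev hb hr hp
    match l with
    | [] => simp [pvJump_nil, pvB_scan]
    | s :: r =>
      by_cases hs : s = 0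
      · subst hs
        rw [pvJump_cons, if_pos rfl, pvB_scan]
        simp only [ne_eq, not_true_eq_false, false_and, if_false, if_neg (by omega : ¬ (0:Int) > best)]
        exact ih r (by simpa using hl) best 0 0 hb (by omega) (Or.inl rfl)
      · -- nonzero sign: one jump step consumes the whole leading run
        have hsp : ¬ (s ≠ 0 ∧ s = prev) := by
          rcases hp with h | h
          · rintro ⟨_, h2⟩; exact hs (h2.trans h)
          · simp only [List.headD_cons] at h
            rintro ⟨_, h2⟩; exact h h2
        set k := pvJumpLen s r with hk
        have hsplit : r = List.replicate k s ++ r.drop k := by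
          conv_lhs => rw [← List.take_append_drop k r]
          rw [pvJumpLen_take]
        rw [pvJump_cons, if_neg hs]
        rw [pvB_scan]
        simp only [if_neg hsp, if_pos hs]
        have hb1 : (if (1:Int) > best then 1 else best) = max best 1 := by
          simp [max_def]; split_ifs <;> omega
        rw [hb1]
        have hscan : pvB_scan r (max best 1) 1 s
            = pvB_scan (r.drop k) (max (max best 1) (1 + (k:Int))) (1 + (k:Int)) s := by
          conv_lhs => rw [hsplit]
          exact pv_scan_replicate s hs (r.drop k) k (max best 1) 1 (le_max_right _ _)
        rw [hscan]
        have hmaxx : max (max best 1) (1 + (k:Int)) = max best (1 + (k:Int)) := by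
          have : (1:Int) ≤ 1 + (k:Int) := by omega
          omega
        rw [hmaxx]
        have hdropk : (r.drop k).length ≤ n := by
          have := List.length_drop (l := r) (i := k)
          have hl' : r.length ≤ n := by simpa using hl
          omega
        have hhd : (r.drop k).headD 0 ≠ s := by
          cases hh : (r.drop k).head? with
          | none => simp [List.headD_eq_head?_getD, hh]; exact fun h => hs h.symm
          | some x =>
            have := pvJumpLen_head s r x (by rw [hh]; simp)
            simp [List.headD_eq_head?_getD, hh]
            exact this
        have := ih (r.drop k) hdropk (max best (1 + (k:Int))) (1 + (k:Int)) s
          (by omega) (le_max_right _ _) (Or.inr hhd)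
        have hbest' : (if (k:Int) + 2 > best + 1 then (k:Int) + 2 else best + 1)
            = max best (1 + (k:Int)) + 1 := by
          simp [max_def]; split_ifs <;> omega
        rw [hbest']
        exact this

-- Index-level facts connecting the B port to the list-level jump.
lemma pv_signs_length (array : List Int) : (pvB_signs array).length = array.length - 1 := by
  simp [pvB_signs]

lemma pv_signs_getElem? (array : List Int) (k : Nat) (h : k + 1 < array.length) :
    (pvB_signs array)[k]? = some (pvSgn (pvAt array k) (pvAt array (k + 1))) := by
  have hk : k < (pvB_signs array).length := by rw [pv_signs_length]; omega
  rw [List.getElem?_eq_getElem hk]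
  congr 1
  have hk1 : k < (array.zip array.tail).length := by
    simpa [pvB_signs] using hk
  simp only [pvB_signs, List.getElem_map]
  rw [List.getElem_zip]
  have h1 : k < array.length := by omega
  have h2 : k < array.tail.length := by simp; omega
  rw [List.getElem_tail]
  simp [pvAt, List.getD_eq_getElem?_getD, List.getElem?_eq_getElem h1,
    List.getElem?_eq_getElem (by omega : k + 1 < array.length)]

lemma pv_signs_drop_cons (array : List Int) (k : Nat) (h : k + 1 < array.length) :
    (pvB_signs array).drop k
      = pvSgn (pvAt array k) (pvAt array (k + 1)) :: (pvB_signs array).drop (k + 1) := by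
  have hk : k < (pvB_signs array).length := by rw [pv_signs_length]; omega
  rw [List.drop_eq_getElem_cons hk]
  congr 1
  have := pv_signs_getElem? array k h
  rw [List.getElem?_eq_getElem hk] at this
  exact Option.some_injective _ this

lemma pv_signs_drop_nil (array : List Int) (k : Nat) (h : ¬ k + 1 < array.length) :
    (pvB_signs array).drop k = [] := by
  apply List.drop_eq_nil_of_le
  rw [pv_signs_length]; omega

lemma pv_inner_eq (array : List Int) (j : Nat) (s : Int) :
    pvB_inner array j s = j + pvJumpLen s ((pvB_signs array).drop j) := by
  fun_induction pvB_inner with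
  | case1 j h ih =>
    obtain ⟨h1, h2⟩ := h
    rw [pv_signs_drop_cons array j h1, h2, pvJumpLen, if_pos rfl, ih]
    omega
  | case2 j h =>
    by_cases h1 : j + 1 < array.length
    · have h2 : pvSgn (pvAt array j) (pvAt array (j + 1)) ≠ s := by tauto
      rw [pv_signs_drop_cons array j h1, pvJumpLen, if_neg h2]
      omega
    · rw [pv_signs_drop_nil array j h1]
      simp [pvJumpLen]

lemma pv_outer_eq (array : List Int) (i : Nat) (best : Int) :
    pvB_outer array i best = pvJump ((pvB_signs array).drop i) best := by
  fun_induction pvB_outer with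
  | case1 i best h s hs ih =>
    rw [pv_signs_drop_cons array i h, pvJump_cons, if_pos hs]
    exact ih
  | case2 i best h s hs j best' ih =>
    rw [ih, pv_signs_drop_cons array i h,
      show pvSgn (pvAt array i) (pvAt array (i + 1)) = s from rfl,
      pvJump_cons, if_neg hs, List.drop_drop]
    have hj : j = i + 1 + pvJumpLen s ((pvB_signs array).drop (i + 1)) :=
      pv_inner_eq array (i + 1) s
    have hb2 : (if (pvJumpLen s ((pvB_signs array).drop (i + 1)) : Int) + 2 > best
        then (pvJumpLen s ((pvB_signs array).drop (i + 1)) : Int) + 2 else best) = best' := by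
      have hb3 : best' = if (j : Int) - i + 1 > best then (j : Int) - i + 1 else best := rfl
      rw [hb3, hj]
      push_cast
      split_ifs <;> omega
    rw [← hj, hb2]
  | case3 i best h =>
    rw [pv_signs_drop_nil array i h, pvJump_nil]

lemma pv_alt_eq_scan (array : List Int) :
    find_max_monotonic_repeat_alt array = pvB_scan (pvB_signs array) 0 0 0 + 1 := by
  rw [find_max_monotonic_repeat_alt, pv_outer_eq, List.drop_zero]
  have := pv_jump_eq_scan (pvB_signs array).length (pvB_signs array) le_rfl 0 0 0
    le_rfl le_rfl (Or.inl rfl)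
  simpa using this

-- ===== VERDICT (by name: the statement is the Claim_ definition above) =====
theorem find_max_monotonic_repeat_spec : Claim_equal_find_max_monotonic_repeat := by
  intro array _
  unfold Spec_find_max_monotonic_repeat
  rw [pv_alt_eq_scan]
  unfold find_max_monotonic_repeat
  match array with
  | [] => simp [pvB_signs, pvB_scan]
  | [a] => simp [pvB_signs, pvB_scan]
  | a :: b :: l =>
    have hlen : ¬ ((a :: b :: l).length == 1) = true := by simp
    rw [if_neg hlen]
    have := pv_key (b :: l) a 0 0 0 true (by omega) (by omega) (by omega) (by omega)
      (fun _ => rfl)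
    simpa using this
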